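-- pv_equiv track=rewrite | github.com/psr/Advent-of-Code | 2025/day03.py | find_largest_joltage
-- ===== SOURCE A (Python) =====
-- def find_largest_joltage(bank):
--     battery_pairs = zip(bank, bank[1:])
--     tens, units = next(battery_pairs)
--     for left, right in battery_pairs:
--         if tens < left:
--             tens = left
--             units = right
--             continue
--         if units < right:
--             units = right
--     return tens * 10 + units
-- ===== SOURCE B (Python) =====
-- def find_largest_joltage(bank):
--     tens = max(bank[:-1])
--     i0 = bank.index(tens)
--     return tens * 10 + max(bank[i0 + 1:])
-- ===== Notes on version B (the rewrite author's own statement) =====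
-- stated objective: simpler
-- what changed: Replaces the single interleaved scan maintaining (tens, units) with a direct max/index formulation: tens = max(bank[:-1]), i0 = first index of that max, answer = tens*10 + max(bank[i0+1:]).
import Mathlib
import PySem

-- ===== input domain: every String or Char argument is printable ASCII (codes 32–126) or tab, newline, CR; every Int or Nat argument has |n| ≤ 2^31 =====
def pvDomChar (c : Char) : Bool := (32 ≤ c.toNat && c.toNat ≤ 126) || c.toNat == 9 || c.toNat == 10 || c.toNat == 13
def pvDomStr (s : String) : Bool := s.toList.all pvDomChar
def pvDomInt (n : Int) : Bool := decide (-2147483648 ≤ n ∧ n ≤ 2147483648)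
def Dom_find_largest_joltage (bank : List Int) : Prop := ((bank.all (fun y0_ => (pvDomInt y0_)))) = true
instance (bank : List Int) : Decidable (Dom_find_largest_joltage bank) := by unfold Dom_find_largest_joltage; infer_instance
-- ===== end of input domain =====

-- B replaces A's single interleaved scan with a plain max/index formulation (objective: simpler).

-- ===== PORT A =====
-- zip(bank, bank[1:]); next() raises StopIteration on fewer than 2 elements (excluded by Pre_; the 0 of the [] branch is unreachable there)
def find_largest_joltage (bank : List Int) : Int :=
  let battery_pairs := List.zip bank (PySem.List.slice bank (some 1) none)
  match battery_pairs with
  | [] => 0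
  | (tens, units) :: rest =>
    let s := rest.foldl (fun (s : Int × Int) (p : Int × Int) =>
      if s.1 < p.1 then (p.1, p.2) else if s.2 < p.2 then (s.1, p.2) else s) (tens, units)
    s.1 * 10 + s.2

-- ===== PORT B =====
-- max(bank[:-1]) / max(bank[i0+1:]) raise ValueError on an empty argument (excluded by Pre_); .getD 0 is the totalisation
def find_largest_joltage_alt (bank : List Int) : Int :=
  let tens := (PySem.List.max? (PySem.List.slice bank none (some (-1))) (fun x => x)).getD 0
  let i0 := (PySem.List.index? bank tens).getD 0
  tens * 10 + (PySem.List.max? (PySem.List.slice bank (some ((i0 : Int) + 1)) none) (fun x => x)).getD 0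

-- ===== PRECONDITION & SPEC =====
-- A raises StopIteration (and B ValueError) on banks of fewer than 2 elements; both return on all others.
def Pre_find_largest_joltage (bank : List Int) : Prop := 2 ≤ bank.length
instance (bank : List Int) : Decidable (Pre_find_largest_joltage bank) := by unfold Pre_find_largest_joltage; infer_instance
def pvWitness_find_largest_joltage : List Int := [3, 1, 4]

def Spec_find_largest_joltage (bank : List Int) (out : Int) : Prop := out = find_largest_joltage_alt bank
instance (bank : List Int) (out : Int) : Decidable (Spec_find_largest_joltage bank out) := by unfold Spec_find_largest_joltage; infer_instance

-- ===== CLAIM (what is proved, stated in full; the proofs are below) =====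
def Claim_equal_find_largest_joltage : Prop := ∀ (bank : List Int), Dom_find_largest_joltage bank → Pre_find_largest_joltage bank → Spec_find_largest_joltage bank (find_largest_joltage bank)

-- ===== LEMMAS AND PROOFS =====

-- max of a nonempty list (the 0 on [] is never used)
def nmax : List Int → Int
  | [] => 0
  | x :: xs => xs.foldl max x

-- A's loop body
def stepAJ (s p : Int × Int) : Int × Int :=
  if s.1 < p.1 then (p.1, p.2) else if s.2 < p.2 then (s.1, p.2) else s

-- A's fold, as a pair
def AcoreAJ (bank : List Int) : Int × Int :=
  match List.zip bank bank.tail with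
  | [] => (0, 0)
  | (t, u) :: rest => rest.foldl stepAJ (t, u)

lemma le_nmax {l : List Int} {y : Int} (h : y ∈ l) : y ≤ nmax l := by
  cases l with
  | nil => cases h
  | cons x xs =>
    rcases List.mem_cons.mp h with rfl | hy
    · exact (PySem.List.le_foldl_max xs y).1
    · exact (PySem.List.le_foldl_max xs x).2 y hy

lemma foldl_max_mem : ∀ (xs : List Int) (a : Int), xs.foldl max a ∈ a :: xs := by
  intro xs
  induction xs with
  | nil => intro a; simp
  | cons y ys ih =>
    intro a
    have := ih (max a y)
    rcases List.mem_cons.mp this with heq | hmem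
    · rw [List.foldl_cons, heq]
      rcases max_choice a y with h | h <;> simp [h]
    · simp [List.foldl_cons]
      right; right
      simpa using hmem

lemma nmax_mem {l : List Int} (h : l ≠ []) : nmax l ∈ l := by
  cases l with
  | nil => exact absurd rfl h
  | cons x xs => simpa [nmax] using foldl_max_mem xs x

lemma nmax_append {ys : List Int} (h : ys ≠ []) (z : Int) :
    nmax (ys ++ [z]) = max (nmax ys) z := by
  cases ys with
  | nil => exact absurd rfl h
  | cons y t => simp [nmax, List.foldl_append]

lemma idxOf_le_of_getElem {l : List Int} {v : Int} {j : Nat} (hj : j < l.length)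
    (he : l[j] = v) : List.idxOf v l ≤ j := by
  induction l generalizing j with
  | nil => simp at hj
  | cons x xs ih =>
    cases j with
    | zero =>
      simp at he
      simp [he]
    | succ k =>
      by_cases hx : x = v
      · simp [hx]
      · have : List.idxOf v xs ≤ k := ih (by simpa using hj) (by simpa using he)
        simp [hx]
        omega

lemma idxOf?_of_mem {l : List Int} {v : Int} (h : v ∈ l) :
    List.idxOf? v l = some (List.idxOf v l) := by
  rw [List.idxOf?_eq_some_iff]
  refine ⟨List.idxOf_lt_length_of_mem h, List.getElem_idxOf _, fun j hj he => ?_⟩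
  exact absurd (idxOf_le_of_getElem (Nat.lt_trans hj (List.idxOf_lt_length_of_mem h)) he) (by omega)

-- adjacent-pair list of ys ++ [x]
lemma zt_concat : ∀ (t : List Int) (y x : Int),
    List.zip (y :: t ++ [x]) (y :: t ++ [x]).tail
      = List.zip (y :: t) (y :: t).tail ++ [((y :: t).getLast (by simp), x)] := by
  intro t
  induction t with
  | nil => intro y x; simp
  | cons z r ih =>
    intro y x
    have h := ih z x
    simp only [List.cons_append, List.tail_cons] at h ⊢
    rw [List.zip_cons_cons, List.zip_cons_cons, h]
    simp

-- characterisation of A's fold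
lemma AcoreAJ_char : ∀ (bank : List Int), 2 ≤ bank.length →
    AcoreAJ bank = (nmax bank.dropLast,
      nmax (bank.drop (List.idxOf (nmax bank.dropLast) bank + 1))) := by
  intro bank
  induction bank using List.reverseRecOn with
  | nil => intro h; simp at h
  | append_singleton ys x ih =>
    intro hlen
    simp only [List.length_append, List.length_cons, List.length_nil] at hlen
    match ys, hlen with
    | [a], _ =>
      simp [AcoreAJ, nmax]
    | (a :: b :: t), _ =>
      set ys := a :: b :: t with hys
      have hysne : ys ≠ [] := by simp [hys]
      have hlys : 2 ≤ ys.length := by simp [hys]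
      have hdlys : ys.dropLast.length = ys.length - 1 := List.length_dropLast
      have hdlne : ys.dropLast ≠ [] := by
        intro hc; rw [hc] at hdlys; simp at hdlys; omega
      set L := ys.getLast hysne with hL
      set M := nmax ys.dropLast with hM
      have hsplit : ys.dropLast ++ [L] = ys := List.dropLast_append_getLast hysne
      have hnmaxys : nmax ys = max M L := by
        conv_lhs => rw [← hsplit]
        exact nmax_append hdlne L
      -- unfold AcoreAJ on ys ++ [x] using zt_concat
      have hzc := zt_concat (b :: t) a x
      have hIH := ih hlys
      have hMmem : M ∈ ys.dropLast := nmax_mem hdlne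
      have hMys : M ∈ ys := List.dropLast_subset ys hMmem
      have hidxys : List.idxOf M ys = List.idxOf M ys.dropLast := by
        conv_lhs => rw [← hsplit]
        rw [List.idxOf_append, if_pos hMmem]
      have hidxlt : List.idxOf M ys < ys.length - 1 := by
        rw [hidxys]
        have := List.idxOf_lt_length_of_mem hMmem
        omega
      have hAc : AcoreAJ (ys ++ [x]) = stepAJ (AcoreAJ ys) (L, x) := by
        simp only [AcoreAJ, hys]
        rw [hzc]
        have hne : List.zip (a :: b :: t) (a :: b :: t).tail = (a, b) :: List.zip (b :: t) t := by
          simp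
        rw [hne]
        simp only [List.cons_append, List.foldl_cons, List.foldl_append, List.foldl_nil]
        rfl
      rw [hAc, hIH]
      have hdl : (ys ++ [x]).dropLast = ys := List.dropLast_concat
      rw [hdl, hnmaxys]
      by_cases hc : M < L
      · -- new strict max at the last position of ys
        have hmaxL : max M L = L := max_eq_right (le_of_lt hc)
        rw [hmaxL]
        have hLnot : L ∉ ys.dropLast := by
          intro hmem
          exact absurd (le_nmax hmem) (by omega)
        have hidx : List.idxOf L (ys ++ [x]) = ys.dropLast.length := by
          conv_lhs => rw [← hsplit]
          rw [List.append_assoc]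
          rw [List.idxOf_append, if_neg hLnot]
          simp
        have hlen' : ys.dropLast.length + 1 = ys.length := by omega
        rw [hidx]
        have hdrop : (ys ++ [x]).drop (ys.dropLast.length + 1) = [x] := by
          rw [hlen', List.drop_append_of_le_length (le_refl _)]
          simp
        rw [hdrop]
        simp [stepAJ, hc, nmax]
      · -- last element does not beat the running max
        have hmaxM : max M L = M := max_eq_left (not_lt.mp hc)
        rw [hmaxM]
        have hidx : List.idxOf M (ys ++ [x]) = List.idxOf M ys :=
          by rw [List.idxOf_append, if_pos hMys]
        rw [hidx]
        have hdrop : (ys ++ [x]).drop (List.idxOf M ys + 1)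
            = ys.drop (List.idxOf M ys + 1) ++ [x] :=
          List.drop_append_of_le_length (by omega)
        have hdropne : ys.drop (List.idxOf M ys + 1) ≠ [] := by
          intro hnil
          rw [List.drop_eq_nil_iff] at hnil
          omega
        rw [hdrop, nmax_append hdropne]
        simp only [stepAJ, if_neg hc]
        by_cases hu : nmax (ys.drop (List.idxOf M ys + 1)) < x
        · rw [if_pos hu, max_eq_right (le_of_lt hu)]
        · rw [if_neg hu, max_eq_left (not_lt.mp hu)]

lemma A_eq_Acore (bank : List Int) :
    find_largest_joltage bank = (AcoreAJ bank).1 * 10 + (AcoreAJ bank).2 := by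
  unfold find_largest_joltage AcoreAJ
  rw [PySem.List.slice_from_one]
  cases h : List.zip bank bank.tail with
  | nil => simp
  | cons p rest =>
    cases p
    have hfun : (fun (s p : Int × Int) =>
        if s.1 < p.1 then (p.1, p.2) else if s.2 < p.2 then (s.1, p.2) else s) = stepAJ := by
      funext s q; simp [stepAJ]
    simp [hfun]

lemma max?_id_eq_nmax {l : List Int} (h : l ≠ []) :
    PySem.List.max? l (fun x => x) = some (nmax l) := by
  cases hm : PySem.List.max? l (fun x => x) with
  | none => exact absurd ((PySem.List.max?_eq_none_iff l _).mp hm) h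
  | some m =>
    have h1 : m ∈ l := PySem.List.max?_mem hm
    have h2 := PySem.List.max?_isMax hm
    have h3 : nmax l ≤ m := h2 _ (nmax_mem h)
    have h4 : m ≤ nmax l := le_nmax h1
    rw [le_antisymm h4 h3]

lemma Balt_char (bank : List Int) (h : 2 ≤ bank.length) :
    find_largest_joltage_alt bank = nmax bank.dropLast * 10 +
      nmax (bank.drop (List.idxOf (nmax bank.dropLast) bank + 1)) := by
  have hdlbank : bank.dropLast.length = bank.length - 1 := List.length_dropLast
  have hdlne : bank.dropLast ≠ [] := by
    intro hc; rw [hc] at hdlbank; simp at hdlbank; omega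
  set M := nmax bank.dropLast with hM
  have hMmem : M ∈ bank.dropLast := nmax_mem hdlne
  have hMbank : M ∈ bank := List.dropLast_subset bank hMmem
  have hsplit : bank.dropLast ++ [bank.getLast (by intro hc; subst hc; simp at h)] = bank :=
    List.dropLast_append_getLast _
  have hidxlt : List.idxOf M bank < bank.length - 1 := by
    have h1 : List.idxOf M bank = List.idxOf M bank.dropLast := by
      conv_lhs => rw [← hsplit]
      rw [List.idxOf_append, if_pos hMmem]
    rw [h1]
    have := List.idxOf_lt_length_of_mem hMmem
    omega
  have hdropne : bank.drop (List.idxOf M bank + 1) ≠ [] := by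
    intro hnil
    rw [List.drop_eq_nil_iff] at hnil
    omega
  have hcast : ((List.idxOf M bank : Int) + 1) = ((List.idxOf M bank + 1 : Nat) : Int) := by
    push_cast; ring
  have hmax1 : PySem.List.max? bank.dropLast (fun x => x) = some M := by
    rw [hM]; exact max?_id_eq_nmax hdlne
  simp only [find_largest_joltage_alt, PySem.List.slice_to_neg_one, PySem.List.index?_eq_idxOf?,
    hmax1, Option.getD_some, idxOf?_of_mem hMbank, hcast, PySem.List.slice_from_natCast,
    max?_id_eq_nmax hdropne]

-- ===== VERDICT (by name: the statement is the Claim_ definition above) =====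
theorem find_largest_joltage_spec : Claim_equal_find_largest_joltage := by
  intro bank _ hpre
  unfold Spec_find_largest_joltage
  rw [A_eq_Acore, AcoreAJ_char bank hpre, Balt_char bank hpre]
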